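/- GENERATED by tools/from_farm_form.py from farm/worked/realloc/Lemmas.lean (a worked proof of the farm's unit `realloc`,
   accepted by the verdict) — do not edit. -/
import ProgX.Base.Spec.Units.realloc

open X86 X86.User Asan ProgX.Base

set_option maxRecDepth 4000
set_option maxHeartbeats 4000000

namespace ProgX.Base.Spec.Proved.realloc
open ProgX.Base.Spec.realloc (Statement)

/-- **THE EPILOGUE** (0x103b73): from any state there whose stack holds the four saved registers and the return address, whose
memory differs from the entry's inside the contract's footprint only, and whose rbp holds a result `r` that makes the
postcondition true, to `Returned`. -/
theorem realloc_epilogue_w (Lay : Layout) (hLay : Lay.hi = 0x1000000) (μ : Microarch) (hμ : UserX.MicroOK μ) (u₀ : State)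
    (hcode : HasCodeNat Lay u₀ ProgX.Base.L.realloc.entry ProgX.Base.Code.code_realloc.nat ProgX.Base.L.realloc.size)
    (H : Heap) (rest : List Obj) (frames : List (Nat × FrameLayout)) (n c : Nat) (u : State) (ret : Word)
    (he : AtEntry (ProgX.Base.conv u₀) ProgX.Base.L.realloc.entry (ProgX.Base.Spec.realloc.spec H rest frames n c).frame ret u) :
    ∀ (s : State) (r : Word), s.rip = ProgX.Base.L.realloc.cut3 → s.reg .rsp = u.reg .rsp - 40 → s.reg .rbp = r →
      RegsKept [.rbx, .rbp, .r12, .r13, .rsp, .rax, .rcx, .rdx, .rsi, .rdi, .r8, .r9, .r10, .r11,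
        .r16, .r17, .r18, .r19, .r20, .r21, .r22, .r23, .r24, .r25, .r26, .r27, .r28, .r29, .r30, .r31] u s →
      UInt64.ofNat (s.mem.readLE (u.reg .rsp) 8) = ret →
      UInt64.ofNat (s.mem.readLE (u.reg .rsp - 8) 8) = u.reg .r13 →
      UInt64.ofNat (s.mem.readLE (u.reg .rsp - 16) 8) = u.reg .r12 →
      UInt64.ofNat (s.mem.readLE (u.reg .rsp - 24) 8) = u.reg .rbp →
      UInt64.ofNat (s.mem.readLE (u.reg .rsp - 32) 8) = u.reg .rbx →
      s.flags.get .df = false → s.mxcsr &&& 8064 = 8064 →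
      Mem.EqOn ProgX.Base.L.textLo ProgX.Base.L.textHi u₀.mem s.mem →
      Mem.SameExcept ((ProgX.Base.Spec.realloc.spec H rest frames n c).footprint u) u.mem s.mem →
      (∀ v : State, v.mem = s.mem → v.reg .rax = r → (ProgX.Base.Spec.realloc.spec H rest frames n c).post u v) →
      ReachVia Lay μ ProgX.Base.WayInv s (Returned (ProgX.Base.conv u₀) (ProgX.Base.Spec.realloc.spec H rest frames n c) u ret) := by
  v_entry he
  intro s r w_rip w_rsp w_rbp w_kept hs0 hs1 hs2 hs3 hs4 hdf hmx w_eq hfoot hpost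
  u_walk hcode [hμ.vendor] span [ProgX.Base.L.textLo, ProgX.Base.L.textHi] side (v_side)
  refine ReachVia.done ?_
  v_returned
  · exact hpost _ w_mem w_rax
  · rw [w_mem]
    exact hfoot

/-- **THE IN-PLACE PATH** (0x103b8e): the capacity of the object at `p` holds `r16 m` bytes. `mov [rbx - 32], rbp` (the size word),
`arena_poison(p, n)`, `arena_unpoison(p, m)`, `mov rbp, rbx`, the epilogue. From any state there that differs from the entry state on
the function's stack frame only. -/
theorem realloc_inplace_w (Lay : Layout) (hLay : Lay.hi = 0x1000000) (μ : Microarch) (hμ : UserX.MicroOK μ) (u₀ : State)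
    (hcode : HasCodeNat Lay u₀ ProgX.Base.L.realloc.entry ProgX.Base.Code.code_realloc.nat ProgX.Base.L.realloc.size)
    (hpoison : Calls Lay μ ProgX.Base.WayInv (ProgX.Base.conv u₀) ProgX.Base.L.arena_poison.entry arenaPoisonSpec)
    (hunpoison : Calls Lay μ ProgX.Base.WayInv (ProgX.Base.conv u₀) ProgX.Base.L.arena_unpoison.entry arenaUnpoisonSpec)
    (H : Heap) (rest : List Obj) (frames : List (Nat × FrameLayout)) (n c : Nat) (u : State) (ret : Word)
    (he : AtEntry (ProgX.Base.conv u₀) ProgX.Base.L.realloc.entry (ProgX.Base.Spec.realloc.spec H rest frames n c).frame ret u)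
    (hp : ProgX.Base.Spec.HeapPre H rest frames u) (hlc : H.LiveCap (u.reg .rdi).toNat n c)
    (hm : r16 (u.reg .rsi).toNat ≤ c) :
    ∀ (s : State) (rv : Word), s.rip = ProgX.Base.L.realloc.cut4 → s.reg .rsp = u.reg .rsp - 40 → s.reg .rbx = u.reg .rdi →
      s.reg .rbp = u.reg .rsi → s.reg .rax = rv → rv.toNat = n →
      RegsKept [.rbx, .rbp, .r12, .r13, .rsp, .rax, .rcx, .rdx, .rsi, .rdi, .r8, .r9, .r10, .r11,
        .r16, .r17, .r18, .r19, .r20, .r21, .r22, .r23, .r24, .r25, .r26, .r27, .r28, .r29, .r30, .r31] u s →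
      UInt64.ofNat (s.mem.readLE (u.reg .rsp) 8) = ret →
      UInt64.ofNat (s.mem.readLE (u.reg .rsp - 8) 8) = u.reg .r13 →
      UInt64.ofNat (s.mem.readLE (u.reg .rsp - 16) 8) = u.reg .r12 →
      UInt64.ofNat (s.mem.readLE (u.reg .rsp - 24) 8) = u.reg .rbp →
      UInt64.ofNat (s.mem.readLE (u.reg .rsp - 32) 8) = u.reg .rbx →
      s.flags.get .df = false → s.mxcsr &&& 8064 = 8064 →
      Mem.EqOn ProgX.Base.L.textLo ProgX.Base.L.textHi u₀.mem s.mem →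
      ShadowUntouched u.mem s.mem →
      Mem.SameExcept [⟨(u.reg .rsp).toNat - 128, (u.reg .rsp).toNat⟩] u.mem s.mem →
      ReachVia Lay μ ProgX.Base.WayInv s (Returned (ProgX.Base.conv u₀) (ProgX.Base.Spec.realloc.spec H rest frames n c) u ret) := by
  have hepi := realloc_epilogue_w Lay hLay μ hμ u₀ hcode H rest frames n c u ret he
  v_entry he
  intro s rv w_rip w_rsp w_rbx w_rbp w_rax hrv w_kept hs0 hs1 hs2 hs3 hs4 hdf hmx w_eq hunS hstackS
  have hok := hp.inv.heap
  have hbase := hp.base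
  have hlimit := hp.limit
  have hroom := hok.room
  rw [hbase, hlimit] at hroom
  have hr := hok.obj_range hlc
  have hi := hok.obj_inside hlc
  have ha := hok.obj_aligned hlc
  have hsc := hok.size_le_cap hlc
  simp only at hr hi ha hsc
  rw [hbase] at hr
  rw [hlimit] at hi
  have hlem := le_r16 (u.reg .rsi).toNat
  have hspk := hp.inv.shadow.stack
  -- the heap's invariant at this state, with the clean stack ending where a callee's return address will be pushed
  have hheapS : Mem.EqOn H.base H.limit u.mem s.mem := by
    apply hstackS.eqOn
    intro w hw
    have e : w = ⟨(u.reg .rsp).toNat - 128, (u.reg .rsp).toNat⟩ := List.mem_singleton.mp hw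
    subst e
    rw [hbase, hlimit]
    simp only
    have := hspk.hi
    omega
  have hinvS : HeapInv H rest frames ((u.reg .rsp).toNat - 40) s.mem :=
    (hp.inv.eqOn hunS hheapS).lower (by omega) (by have := hspk.aligned; omega) (by omega)
  u_walk hcode [hμ.vendor] until [ProgX.Base.L.realloc.cut3] span [ProgX.Base.L.textLo, ProgX.Base.L.textHi] side (v_side)
  case call_inv =>
    v_inv
  case pre_103b98 =>
    -- the precondition of `arena_poison(p, n)`
    show (s_103b98.reg .rdi).toNat % 8 = 0 ∧ 0x100000 ≤ (s_103b98.reg .rdi).toNat ∧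
      (s_103b98.reg .rdi).toNat + ((s_103b98.reg .rsi).toNat + 7) / 8 * 8 ≤ 0xC00000
    rw [w_rdi, w_rsi, hrv]
    omega
  case cont =>
    -- after `arena_poison(p, n)`: `mov rsi, rbp ; mov rdi, rbx ; call arena_unpoison`
    obtain ⟨hmem1, _⟩ := w_post
    rw [w_rdi_103b98, w_rsi_103b98, hrv] at hmem1
    have hmem1' := hmem1.symm
    clear hmem1
    v_after_call w_rsp_103b98 w_mem_103b98
    simp only [ProgX.Spec.arenaPoisonSpec_writes, shadowSpan, w_rdi_103b98, w_rsi_103b98, hrv] at w_same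
    have hsame1 := w_same
    clear w_same
    u_walk hcode [hμ.vendor] until [ProgX.Base.L.realloc.cut3] span [ProgX.Base.L.textLo, ProgX.Base.L.textHi] side (v_side)
    case call_inv =>
      v_inv
    case pre_103ba3 =>
      -- the precondition of `arena_unpoison(p, m)`
      show (s_103ba3.reg .rdi).toNat % 8 = 0 ∧ 0x100000 ≤ (s_103ba3.reg .rdi).toNat ∧
        (s_103ba3.reg .rdi).toNat + (s_103ba3.reg .rsi).toNat ≤ 0xC00000
      rw [w_rdi, w_rsi]
      omega
    case cont =>
      -- after `arena_unpoison(p, m)`: `mov rbp, rbx`, the epilogue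
      obtain ⟨hmem2, _⟩ := w_post
      rw [w_rdi_103ba3, w_rsi_103ba3] at hmem2
      have hmem2' := hmem2.symm
      clear hmem2
      v_after_call w_rsp_103ba3 w_mem_103ba3
      simp only [ProgX.Spec.arenaUnpoisonSpec_writes, shadowSpan, w_rdi_103ba3, w_rsi_103ba3] at w_same
      u_walk hcode [hμ.vendor] until [ProgX.Base.L.realloc.cut3] span [ProgX.Base.L.textLo, ProgX.Base.L.textHi] side (v_side)
      -- everything the stack holds above the callees' slot is as in `s`
      have hkeep : Mem.EqOn ((u.reg .rsp).toNat - 40) ((u.reg .rsp).toNat + 8) s.mem s_103ba3r.mem := by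
        u_eqon
      -- the transition of the heap's invariant
      have hinvF : HeapInv (H.resize (u.reg .rdi).toNat (u.reg .rsi).toNat) rest frames ((u.reg .rsp).toNat - 40)
          s_103ba3r.mem := by
        rw [← hmem2']
        refine hinvS.resize' (mem' := s_103b98.mem) (n := n) hlc hm ?_ ?_ ?_ ?_ ?_ ?_
        · rw [w_mem_103b98]
          v_untouched
        · rw [ProgX.Spec.ofNat_toNat_sub _ 32 (by omega), w_mem_103b98]
          simp only [UInt64.reduceOfNat]
          u_read
        · rw [hbase, w_mem_103b98]
          u_memnorm
          u_eqon
        · rw [hlimit, w_mem_103b98]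
          u_memnorm
          u_eqon
        · rw [w_mem_103ba3, ← hmem1']
          exact eqOn_shadow_writeLE _ _ _ _ (by u_omega) (by left; u_omega)
        · rw [w_mem_103ba3, ← hmem1', hbase, hlimit]
          exact Mem.EqOn.writeLE _ _ _ _ _ _ (by u_omega) (by left; u_omega)
      refine hepi s_103bab (u.reg .rdi) w_rip w_rsp w_rbp (w_kept.mono_all (by rfl)) ?_ ?_ ?_ ?_ ?_ ?_ ?_ w_eq ?_ ?_
      · rw [w_mem, hkeep.readLE (u.reg .rsp) 8 (by u_omega) (by u_omega) (by u_omega)]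
        exact hs0
      · rw [w_mem, hkeep.readLE (u.reg .rsp - 8) 8 (by u_omega) (by u_omega) (by u_omega)]
        exact hs1
      · rw [w_mem, hkeep.readLE (u.reg .rsp - 16) 8 (by u_omega) (by u_omega) (by u_omega)]
        exact hs2
      · rw [w_mem, hkeep.readLE (u.reg .rsp - 24) 8 (by u_omega) (by u_omega) (by u_omega)]
        exact hs3
      · rw [w_mem, hkeep.readLE (u.reg .rsp - 32) 8 (by u_omega) (by u_omega) (by u_omega)]
        exact hs4
      · rw [w_flags]
        exact w_df
      · rw [w_mxcsr]
        exact w_mx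
      · -- the static footprint: the old object lies inside the heap's region, its window is not clipped
        have hfl : ProgX.Spec.heapFloor (u.reg .rdi).toNat = (u.reg .rdi).toNat := ProgX.Spec.heapFloor_of_le (by omega)
        have hcl : ProgX.Spec.heapClip ((u.reg .rdi).toNat + c) = (u.reg .rdi).toNat + c := ProgX.Spec.heapClip_of_le (by omega)
        simp only [X86.User.Spec.footprint, vspec, shadowSpan, Heap.next_def, hbase, hfl, hcl]
        u_same
      · intro v hvm hvr
        refine ⟨fun h0 => ?_, fun _ => ⟨fun _ => ⟨?_, ?_, ?_, ?_⟩, fun hc => ?_, fun hc => ?_⟩⟩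
        · exfalso
          omega
        · rw [hvr]
        · rw [hvm, w_mem]
          exact hp.raise_back hinvF (by omega)
        · rw [hvm, w_mem]
          u_eqon
        · -- what the in-place path wrote: the stack frame, the size word of the header, the shadow of the chunk's room
          rw [hvm, w_mem]
          simp only [shadowSpan]
          u_same
        · exfalso
          omega
        · exfalso
          omega

/-- **THE TAIL OF THE MOVE** (0x103b5a): a `heap_alloc(m, c')` succeeded: rax is the new object `H.next` of the heap
`H.push m c'`. `memcpy(q, p, n)`, `free(p)`, `mov rax, rbp`, the epilogue. From any state there that differs from the entry state on
the function's stack frame and the footprint of the allocation only. `c'` is `H.moveCap m` (`2 * r16 m`, or `r16 m`). -/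
theorem realloc_move_tail_w (Lay : Layout) (hLay : Lay.hi = 0x1000000) (μ : Microarch) (hμ : UserX.MicroOK μ) (u₀ : State)
    (hcode : HasCodeNat Lay u₀ ProgX.Base.L.realloc.entry ProgX.Base.Code.code_realloc.nat ProgX.Base.L.realloc.size)
    (h_memcpy : ∀ (others : List Obj) (frames : List (Nat × FrameLayout)),
      Calls Lay μ ProgX.Base.WayInv (ProgX.Base.conv u₀) ProgX.Base.L.memcpy.entry (ProgX.Base.Spec.memcpy.spec others frames))
    (h_free : ∀ (H : Heap) (rest : List Obj) (frames : List (Nat × FrameLayout)) (n : Nat),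
      Calls Lay μ ProgX.Base.WayInv (ProgX.Base.conv u₀) ProgX.Base.L.free.entry (ProgX.Base.Spec.free.spec H rest frames n))
    (H : Heap) (rest : List Obj) (frames : List (Nat × FrameLayout)) (n c : Nat) (u : State) (ret : Word)
    (he : AtEntry (ProgX.Base.conv u₀) ProgX.Base.L.realloc.entry (ProgX.Base.Spec.realloc.spec H rest frames n c).frame ret u)
    (hp : ProgX.Base.Spec.HeapPre H rest frames u) (hlc : H.LiveCap (u.reg .rdi).toNat n c)
    (hlt : c < r16 (u.reg .rsi).toNat) (c' : Nat) (hfit : H.Fits c') (hnc : r16 (u.reg .rsi).toNat ≤ c')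
    (hcap : c' = H.moveCap (u.reg .rsi).toNat) :
    ∀ (s : State) (q rv : Word), s.rip = ProgX.Base.L.realloc.cut2 → s.reg .rsp = u.reg .rsp - 40 → s.reg .rbx = u.reg .rdi →
      s.reg .rax = q → q.toNat = H.next → s.reg .r12 = rv → rv.toNat = n →
      RegsKept [.rbx, .rbp, .r12, .r13, .rsp, .rax, .rcx, .rdx, .rsi, .rdi, .r8, .r9, .r10, .r11,
        .r16, .r17, .r18, .r19, .r20, .r21, .r22, .r23, .r24, .r25, .r26, .r27, .r28, .r29, .r30, .r31] u s →
      UInt64.ofNat (s.mem.readLE (u.reg .rsp) 8) = ret →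
      UInt64.ofNat (s.mem.readLE (u.reg .rsp - 8) 8) = u.reg .r13 →
      UInt64.ofNat (s.mem.readLE (u.reg .rsp - 16) 8) = u.reg .r12 →
      UInt64.ofNat (s.mem.readLE (u.reg .rsp - 24) 8) = u.reg .rbp →
      UInt64.ofNat (s.mem.readLE (u.reg .rsp - 32) 8) = u.reg .rbx →
      s.flags.get .df = false → s.mxcsr &&& 8064 = 8064 →
      Mem.EqOn ProgX.Base.L.textLo ProgX.Base.L.textHi u₀.mem s.mem →
      HeapInv (H.push (u.reg .rsi).toNat c') rest frames ((u.reg .rsp).toNat - 40) s.mem →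
      Mem.SameExcept [⟨(u.reg .rsp).toNat - 128, (u.reg .rsp).toNat⟩, ⟨0x800000, 0x800008⟩,
        ⟨0x800000 + 32 + H.used, 0x800000 + 32 + H.used + 24⟩,
        ⟨0xC00000 + (0x800000 + 32 + H.used + 32) / 8,
         0xC00000 + (0x800000 + 32 + H.used + 32 + (u.reg .rsi).toNat + 7) / 8⟩] u.mem s.mem →
      ReachVia Lay μ ProgX.Base.WayInv s (Returned (ProgX.Base.conv u₀) (ProgX.Base.Spec.realloc.spec H rest frames n c) u ret) := by
  have hepi := realloc_epilogue_w Lay hLay μ hμ u₀ hcode H rest frames n c u ret he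
  have hmemcpy := h_memcpy ((H.push (u.reg .rsi).toNat c').liveObjs ++ rest) frames
  have hfree := h_free (H.push (u.reg .rsi).toNat c') rest frames n
  v_entry he
  intro s q rv w_rip w_rsp w_rbx w_rax hq w_r12 hrv w_kept hs0 hs1 hs2 hs3 hs4 hdf hmx w_eq hinvS hfootS
  have hok := hp.inv.heap
  have hbase := hp.base
  have hlimit := hp.limit
  have hroom := hok.room
  rw [hbase, hlimit] at hroom
  have hr := hok.obj_range hlc
  have hi := hok.obj_inside hlc
  have ha := hok.obj_aligned hlc
  have hsc := hok.size_le_cap hlc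
  have hrn := (hok.capOK _ hlc).1
  have habove := hok.next_above hlc
  simp only at hr hi ha hsc hrn habove
  rw [hbase] at hr
  rw [hlimit] at hi
  obtain ⟨r1, r2, r3, r4, r5⟩ := hok.next_range hfit
  rw [Heap.next_def, hbase] at r1 r2 r3 r4 r5 habove hq
  rw [hlimit] at r3
  have hlem := le_r16 (u.reg .rsi).toNat
  have hlen := le_r16 n
  -- `n < m`: the old object fits its capacity, the new size does not
  have hnm : n < (u.reg .rsi).toNat := by
    apply Classical.byContradiction
    intro hge
    have := r16_mono (show (u.reg .rsi).toNat ≤ n by omega)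
    omega
  have hspk := hp.inv.shadow.stack
  have hbase' : (H.push (u.reg .rsi).toNat c').base = 0x800000 := hbase
  have hlimit' : (H.push (u.reg .rsi).toNat c').limit = 0xC00000 := hlimit
  have hliveOld : (H.push (u.reg .rsi).toNat c').Live (u.reg .rdi).toNat n := hlc.live.push _ _
  have hlcNew : (H.push (u.reg .rsi).toNat c').LiveCap H.next (u.reg .rsi).toNat c' := Heap.liveCap_push H _ c'
  have hliveNew : (H.push (u.reg .rsi).toNat c').Live q.toNat (u.reg .rsi).toNat := by
    rw [hq, ← hbase, ← Heap.next_def]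
    exact hlcNew.live
  u_walk hcode [hμ.vendor] until [ProgX.Base.L.realloc.cut3] span [ProgX.Base.L.textLo, ProgX.Base.L.textHi] side (v_side)
  case call_inv =>
    v_inv
  case pre_103b66 =>
    -- the precondition of `memcpy(q, p, n)`: source the old object, destination the new one, which lies above it
    have et : (s_103b66.reg .rsp).toNat + 8 = (u.reg .rsp).toNat - 40 := by
      rw [w_rsp]
      u_omega
    have step := hinvS.writeLE_out (u.reg .rsp - 48) 8 1063787 (by u_omega)
      (by rw [hbase']; left; u_omega) (by left; u_omega)
    have hp' : ProgX.Base.Spec.HeapPre (H.push (u.reg .rsi).toNat c') rest frames s_103b66 :=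
      ⟨by rw [w_mem, et]; exact step, hbase', hlimit', hp.text, hp.offText⟩
    refine ⟨hp'.shadowPre, Or.inr ⟨?_, ?_, ?_⟩⟩
    · rw [w_rsi, w_rdx, hrv]
      exact hliveOld.liveIn rest frames (Nat.le_refl _) (Nat.le_refl _)
    · rw [w_rdi, w_rdx, hrv]
      exact hliveNew.liveIn rest frames (Nat.le_refl _) (by omega)
    · rw [w_rdi, w_rsi, w_rdx, hrv, hq]
      right
      omega
  case cont =>
    -- after `memcpy`: `mov rdi, rbx ; call free`
    have et : (s_103b66.reg .rsp).toNat + 8 = (u.reg .rsp).toNat - 40 := by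
      rw [w_rsp_103b66]
      u_omega
    have step := hinvS.writeLE_out (u.reg .rsp - 48) 8 1063787 (by u_omega)
      (by rw [hbase']; left; u_omega) (by left; u_omega)
    rw [← w_mem_103b66] at step
    obtain ⟨_, hun1, hcopy⟩ := w_post
    rw [w_rdi_103b66, w_rsi_103b66, w_rdx_103b66, hrv] at hcopy
    v_after_call w_rsp_103b66 w_mem_103b66
    simp only [w_rdi_103b66, w_rdx_103b66, hrv, hq] at w_same
    have hinv1 : HeapInv (H.push (u.reg .rsi).toNat c') rest frames ((u.reg .rsp).toNat - 40) s_103b66r.mem := by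
      rw [← w_mem_103b66] at w_same
      refine step.sameExcept hun1 w_same ?_
      intro w hw
      rcases List.mem_cons.mp hw with rfl | hw
      · left
        left
        rw [hbase']
        simp only
        u_omega
      · have e : w = ⟨8388608 + 32 + H.used + 32, 8388608 + 32 + H.used + 32 + n⟩ := List.mem_singleton.mp hw
        subst e
        right
        refine ⟨⟨H.next, (u.reg .rsi).toNat, c', .live⟩, hlcNew, ?_, ?_⟩
        · simp only
          rw [Heap.next_def, hbase]
          exact Nat.le_refl _
        · simp only
          rw [Heap.next_def, hbase]
          omega
    have hsame1 := w_same
    clear w_same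
    u_walk hcode [hμ.vendor] until [ProgX.Base.L.realloc.cut3] span [ProgX.Base.L.textLo, ProgX.Base.L.textHi] side (v_side)
    case call_inv =>
      v_inv
    case pre_103b6e =>
      -- the precondition of `free(p)`: `p` is live in the heap with the new object
      have et2 : (s_103b6e.reg .rsp).toNat + 8 = (u.reg .rsp).toNat - 40 := by
        rw [w_rsp]
        u_omega
      have step2 := hinv1.writeLE_out (u.reg .rsp - 48) 8 1063795 (by u_omega)
        (by rw [hbase']; left; u_omega) (by left; u_omega)
      refine ⟨⟨by rw [w_mem, et2]; exact step2, hbase', hlimit', hp.text, hp.offText⟩, Or.inr ?_⟩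
      rw [w_rdi]
      exact hliveOld
    case cont =>
      -- after `free(p)`: `mov rax, rbp`, the epilogue
      have hne : (s_103b6e.reg .rdi).toNat ≠ 0 := by
        rw [w_rdi_103b6e]
        omega
      have k3 := w_post.2 hne
      rw [w_rdi_103b6e] at k3
      have et2 : (s_103b6e.reg .rsp).toNat + 8 = (u.reg .rsp).toNat - 40 := by
        rw [w_rsp_103b6e]
        u_omega
      rw [et2] at k3
      clear w_post
      v_after_call w_rsp_103b6e w_mem_103b6e
      simp only [shadowSpan, w_rdi_103b6e] at w_same
      -- `free` returns to 0x103b73, the epilogue: no instruction is left to walk here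
      have hkeep : Mem.EqOn ((u.reg .rsp).toNat - 40) ((u.reg .rsp).toNat + 8) s.mem s_103b6er.mem := by
        u_eqon
      -- the new object's bytes after `memcpy` survive `free(p)`; the old object's bytes were as at the entry
      have hdst : Mem.EqOn (8388608 + 32 + H.used + 32) (8388608 + 32 + H.used + 32 + n) s_103b66r.mem s_103b6er.mem := by
        u_eqon
      have hsrc : Mem.EqOn (u.reg .rdi).toNat ((u.reg .rdi).toNat + n) u.mem s_103b66.mem := by
        rw [w_mem_103b66]
        u_eqon
      refine hepi s_103b6er q w_rip w_rsp w_rbp (w_kept.mono_all (by rfl)) ?_ ?_ ?_ ?_ ?_ w_df w_mx w_eq ?_ ?_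
      · rw [hkeep.readLE (u.reg .rsp) 8 (by u_omega) (by u_omega) (by u_omega)]
        exact hs0
      · rw [hkeep.readLE (u.reg .rsp - 8) 8 (by u_omega) (by u_omega) (by u_omega)]
        exact hs1
      · rw [hkeep.readLE (u.reg .rsp - 16) 8 (by u_omega) (by u_omega) (by u_omega)]
        exact hs2
      · rw [hkeep.readLE (u.reg .rsp - 24) 8 (by u_omega) (by u_omega) (by u_omega)]
        exact hs3
      · rw [hkeep.readLE (u.reg .rsp - 32) 8 (by u_omega) (by u_omega) (by u_omega)]
        exact hs4
      · -- the static footprint: the allocation fitted, so the new chunk lies inside the heap's region, as the old object does: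
        -- no window is clipped
        have hfl : ProgX.Spec.heapFloor (u.reg .rdi).toNat = (u.reg .rdi).toNat := ProgX.Spec.heapFloor_of_le (by omega)
        have hcl : ProgX.Spec.heapClip ((u.reg .rdi).toNat + c) = (u.reg .rdi).toNat + c := ProgX.Spec.heapClip_of_le (by omega)
        have hcn : ProgX.Spec.heapClip (8388608 + 32 + H.used + 32 + (u.reg .rsi).toNat) =
            8388608 + 32 + H.used + 32 + (u.reg .rsi).toNat := ProgX.Spec.heapClip_of_le (by omega)
        have hch : ProgX.Spec.heapClip (8388608 + 32 + H.used + 32 - 8) = 8388608 + 32 + H.used + 32 - 8 :=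
          ProgX.Spec.heapClip_of_le (by omega)
        simp only [X86.User.Spec.footprint, vspec, shadowSpan, Heap.next_def, hbase, hfl, hcl, hcn, hch]
        u_same
      · intro v hvm hvr
        refine ⟨fun h0 => ?_, fun _ => ⟨fun hc => ?_, fun _ _ => ⟨?_, ?_, ?_, ?_⟩, fun _ hnf => ?_⟩⟩
        · exfalso
          omega
        · exfalso
          omega
        · rw [hvr, hq, Heap.next_def, hbase]
        · rw [hvm, ← hcap]
          exact hp.raise_back k3 (by omega)
        · intro i hi'
          have e1 : UInt64.ofNat (H.next + i) = q + UInt64.ofNat i := by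
            rw [UInt64.ofNat_add, Heap.next_def, hbase, ← hq, UInt64.ofNat_toNat]
          have e2 : UInt64.ofNat ((u.reg .rdi).toNat + i) = u.reg .rdi + UInt64.ofNat i := by
            rw [UInt64.ofNat_add, UInt64.ofNat_toNat]
          have ea : (q + UInt64.ofNat i).toNat = 8388608 + 32 + H.used + 32 + i := by u_omega
          have eb : (u.reg .rdi + UInt64.ofNat i).toNat = (u.reg .rdi).toNat + i := by u_omega
          rw [hvm, e1, e2, hdst.readLE (q + UInt64.ofNat i) 1 (by omega) (by omega) (by omega), hcopy i hi',
            hsrc.readLE (u.reg .rdi + UInt64.ofNat i) 1 (by omega) (by omega) (by omega)]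
        · -- what the moving path wrote: the stack frame, the allocation (control cell, new header, new shadow), the `n` bytes
          -- copied, the state word of the old header and the shadow of the old object (`free`)
          rw [hvm]
          simp only [shadowSpan, Heap.next_def, hbase]
          u_same
        · exfalso
          apply hnf
          unfold Heap.Fits at hfit ⊢
          omega

end ProgX.Base.Spec.Proved.realloc
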